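-- pv_equiv track=rewrite | github.com/haui-fit/addtone_crfsuite | tokens.py | split_sent
-- ===== SOURCE A (Python) =====
-- def split_sent(sent):
--     sent = ' ' + sent + ' '
--     char = ' !@#$%^&*(\'|-=[];);/.{}_,+{}:"<>?'
--     start = 0
--     rs = []
--     for i, s in enumerate(sent):
--         if s in char:
--             s2 = sent[start + 1:i].strip()
--             if s2:
--                 rs.append(s2)
--             if s:
--                 rs.append(s)
--             start = i
--     return rs[1:-1]
-- ===== SOURCE B (Python) =====
-- def split_sent(sent):
--     delims = ' !@#$%^&*(\'|-=[];);/.{}_,+{}:"<>?'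
--     rs = []
--     buf = []
--     for c in sent:
--         if c in delims:
--             tok = ''.join(buf).strip()
--             if tok:
--                 rs.append(tok)
--             rs.append(c)
--             buf = []
--         else:
--             buf.append(c)
--     tok = ''.join(buf).strip()
--     if tok:
--         rs.append(tok)
--     return rs
-- ===== Notes on version B (the rewrite author's own statement) =====
-- stated objective: simpler
-- what changed: Replaces A's wrap-the-sentence-in-spaces trick with index bookkeeping, slicing sent[start+1:i] at each delimiter and finally dropping rs[1:-1], by a plain single pass that accumulates non-delimiter characters in a buffer and flushes the stripped buffer at each delimiter and once at the end.
import Mathlib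
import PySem

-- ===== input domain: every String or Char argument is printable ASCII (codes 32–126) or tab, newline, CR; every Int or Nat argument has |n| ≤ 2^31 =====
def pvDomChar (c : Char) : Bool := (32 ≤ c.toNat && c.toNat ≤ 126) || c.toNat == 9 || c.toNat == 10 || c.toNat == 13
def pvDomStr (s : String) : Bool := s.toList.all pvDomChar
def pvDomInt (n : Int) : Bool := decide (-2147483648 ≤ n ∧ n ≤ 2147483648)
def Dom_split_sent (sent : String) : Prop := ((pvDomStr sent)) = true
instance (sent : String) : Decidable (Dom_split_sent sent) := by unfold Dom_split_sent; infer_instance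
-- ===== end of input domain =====

-- B replaces A's wrap-in-spaces / index-slice / drop-first-and-last trick by a single
-- pass with a token buffer flushed at each delimiter (objective: simpler).

-- the delimiter characters of the Python source (duplicates kept as written)
def pvDelims : List Char := " !@#$%^&*('|-=[];);/.{}_,+{}:\"<>?".toList

-- ===== PORT A =====
-- one loop step of A: state (start, rs), element (i, s) from enumerate(sent)
def pvStepA (cs : List Char) (st : Int × List String) (p : Int × Char) : Int × List String :=
  if p.2 ∈ pvDelims then
    let s2 := PySem.Chars.strip (PySem.List.slice cs (some (st.1 + 1)) (some p.1))
    let rs := if s2 ≠ [] then st.2 ++ [String.ofList s2] else st.2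
    let rs := if ([p.2] : List Char) ≠ [] then rs ++ [String.ofList [p.2]] else rs
    (p.1, rs)
  else st

def split_sent (sent : String) : List String :=
  let cs : List Char := (' ' :: sent.toList) ++ [' ']   -- sent = ' ' + sent + ' '
  let res := (PySem.List.enumerate cs).foldl (pvStepA cs) (0, [])
  PySem.List.slice res.2 (some 1) (some (-1))           -- rs[1:-1]

-- ===== PORT B =====
-- one loop step of B: state (rs, buf)
def pvStepB (st : List String × List Char) (c : Char) : List String × List Char :=
  if c ∈ pvDelims then
    let tok := PySem.Chars.strip st.2
    let rs := if tok ≠ [] then st.1 ++ [String.ofList tok] else st.1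
    (rs ++ [String.ofList [c]], [])
  else (st.1, st.2 ++ [c])

def split_sent_alt (sent : String) : List String :=
  let res := sent.toList.foldl pvStepB ([], [])
  let tok := PySem.Chars.strip res.2
  if tok ≠ [] then res.1 ++ [String.ofList tok] else res.1

-- ===== PRECONDITION & SPEC =====
def Spec_split_sent (sent : String) (out : List String) : Prop := out = split_sent_alt sent
instance (sent : String) (out : List String) : Decidable (Spec_split_sent sent out) := by unfold Spec_split_sent; infer_instance

-- ===== CLAIM (what is proved, stated in full; the proofs are below) =====
def Claim_equal_split_sent : Prop := ∀ (sent : String), Dom_split_sent sent → Spec_split_sent sent (split_sent sent)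

-- ===== LEMMAS AND PROOFS =====

-- the tokens emitted while scanning t with pending buffer buf
-- (no final flush — A's loop flushes only at a delimiter)
def pvOut (t : List Char) (buf : List Char) : List String :=
  match t with
  | [] => []
  | c :: t =>
    if c ∈ pvDelims then
      let tok := PySem.Chars.strip buf
      (if tok ≠ [] then [String.ofList tok] else []) ++ [String.ofList [c]] ++ pvOut t []
    else pvOut t (buf ++ [c])

-- the buffer left over after scanning t with pending buffer buf
def pvBuf (t : List Char) (buf : List Char) : List Char :=
  match t with
  | [] => buf
  | c :: t => if c ∈ pvDelims then pvBuf t [] else pvBuf t (buf ++ [c])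

lemma pvB_fold (t : List Char) : ∀ (rs : List String) (buf : List Char),
    t.foldl pvStepB (rs, buf) = (rs ++ pvOut t buf, pvBuf t buf) := by
  induction t with
  | nil => intro rs buf; simp [pvOut, pvBuf]
  | cons c t ih =>
    intro rs buf
    by_cases h : c ∈ pvDelims
    · simp only [List.foldl_cons, pvStepB, pvOut, pvBuf, if_pos h, ih]
      split_ifs <;> simp
    · simp [pvStepB, pvOut, pvBuf, h, ih]

lemma pvA_fold (cs : List Char) : ∀ (t pre : List Char) (k : Nat) (buf : List Char)
    (rs : List String), cs = pre ++ t → k + 1 + buf.length = pre.length →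
    (cs.drop (k + 1)).take buf.length = buf →
    ((PySem.List.enumerate t (pre.length : Int)).foldl (pvStepA cs) ((k : Int), rs)).2
      = rs ++ pvOut t buf := by
  intro t
  induction t with
  | nil => intro pre k buf rs _ _ _; simp [PySem.List.enumerate, pvOut]
  | cons c t ih =>
    intro pre k buf rs hcs hlen hbuf
    by_cases h : c ∈ pvDelims
    · have hslice : PySem.List.slice cs (some ((k : Int) + 1)) (some (pre.length : Int)) = buf := by
        have h1 : ((k : Int) + 1) = ((k + 1 : Nat) : Int) := by push_cast; ring
        rw [h1, PySem.List.slice_natCast]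
        have h2 : pre.length - (k + 1) = buf.length := by omega
        rw [h2, hbuf]
      simp only [PySem.List.enumerate, List.foldl_cons]
      rw [show (pvStepA cs ((k : Int), rs) ((pre.length : Int), c))
            = ((pre.length : Int),
               (if PySem.Chars.strip buf ≠ [] then rs ++ [String.ofList (PySem.Chars.strip buf)] else rs)
                 ++ [String.ofList [c]]) by
        simp [pvStepA, h, hslice]]
      have hpre : ((pre.length : Int) + 1) = (((pre ++ [c]).length : Nat) : Int) := by
        simp
      rw [hpre, ih (pre ++ [c]) pre.length [] _ (by simpa using hcs) (by simp) (by simp)]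
      simp only [pvOut, if_pos h]
      split_ifs <;> simp
    · simp only [PySem.List.enumerate, List.foldl_cons]
      rw [show (pvStepA cs ((k : Int), rs) ((pre.length : Int), c)) = ((k : Int), rs) by
        simp [pvStepA, h]]
      have hdrop : cs.drop (k + 1) = buf ++ (c :: t) := by
        have hx : cs.drop (k + 1) = (pre.drop (k + 1)) ++ (c :: t) := by
          rw [hcs, List.drop_append_of_le_length (by omega)]
        have hlend : (pre.drop (k + 1)).length = buf.length := by simp; omega
        have : (cs.drop (k + 1)).take buf.length = pre.drop (k + 1) := by
          rw [hx, ← hlend, List.take_left]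
        rw [hx, ← hbuf, this]
      have hpre : ((pre.length : Int) + 1) = (((pre ++ [c]).length : Nat) : Int) := by
        simp
      have htake : List.take ((buf ++ [c]).length) (List.drop (k + 1) cs) = buf ++ [c] := by
        rw [hdrop, List.take_append]
        simp
      rw [hpre, ih (pre ++ [c]) k (buf ++ [c]) rs (by simpa using hcs)
        (by simp only [List.length_append, List.length_cons, List.length_nil]; omega) htake]
      simp [pvOut, h]

lemma pvOut_append_space (t : List Char) : ∀ (buf : List Char),
    pvOut (t ++ [' ']) buf
      = pvOut t buf ++ (if PySem.Chars.strip (pvBuf t buf) ≠ [] then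
          [String.ofList (PySem.Chars.strip (pvBuf t buf))] else []) ++ [String.ofList [' ']] := by
  induction t with
  | nil => intro buf; simp [pvOut, pvBuf, show (' ' ∈ pvDelims) by decide]
  | cons c t ih =>
    intro buf
    by_cases h : c ∈ pvDelims
    · simp [pvOut, pvBuf, h, ih]
    · simp [pvOut, pvBuf, h, ih]

lemma pvSlice_mid (a b : String) (L : List String) :
    PySem.List.slice (a :: (L ++ [b])) (some 1) (some (-1)) = L := by
  simp only [PySem.List.slice, PySem.List.clampIdx]
  norm_num
  rw [if_neg (by omega)]
  simp [List.take_left]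

-- ===== VERDICT (by name: the statement is the Claim_ definition above) =====
theorem split_sent_spec : Claim_equal_split_sent := by
  intro sent _
  show split_sent sent = split_sent_alt sent
  unfold split_sent split_sent_alt
  set cs : List Char := (' ' :: sent.toList) ++ [' '] with hcs
  have h0 : PySem.List.enumerate cs 0 = (0, ' ') :: PySem.List.enumerate (sent.toList ++ [' ']) 1 := by
    simp [hcs]
  have hstep0 : pvStepA cs (0, []) (0, ' ') = (0, [String.ofList [' ']]) := by
    simp [pvStepA, show (' ' ∈ pvDelims) by decide, PySem.List.slice, PySem.List.clampIdx,
      show PySem.Chars.strip [] = [] by decide]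
  have hfold := pvA_fold cs (sent.toList ++ [' ']) [' '] 0 [] [String.ofList [' ']]
    (by simp [hcs]) (by simp) (by simp)
  norm_num at hfold
  simp only [h0, List.foldl_cons, hstep0]
  rw [hfold, pvOut_append_space, pvB_fold]
  simp only [List.nil_append]
  rw [pvSlice_mid]
  split_ifs <;> simp
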